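/-
  THE END THEOREM OF THE TOY PROGRAM, with every unit theorem plugged in: no hypothesis is left.
  (Move pending/Closed.lean and this file to Toy/ when every Toy/Spec/Proved/<id>.lean exists: tools/land_toy_proofs.sh.)
-/
import Toy.Final
import Toy.Closed
import Toy.Spec.Proved.start
namespace Toy
open X86 X86.User Asan ProgX

/-- **The toy program never trips the address sanitizer, and control never leaves its text window**: for every input of at most
1FF000H bytes, on every processor the proof covers, at ring 0 and at ring 3, the run of `X86.run` from the start machine of
c/toy/toy.bin reaches `prog_exit`; after every step before that RIP is inside `[100000H, 140000H)` and not at `__asan_report`. -/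
theorem toy_stays_in_code : ProgX.StaysInCode Toy.image :=
  stays_in_code_of Closed.closed Spec.Proved.start_ok

/-- … hence it never reports. -/
theorem toy_never_reports : ProgX.NeverReports Toy.image :=
  toy_stays_in_code.neverReports

end Toy

#print axioms Toy.toy_stays_in_code
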